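-- pv_equiv track=rewrite | github.com/ejmockler/clou | clou/coordinator.py | _compute_abort_set
-- ===== SOURCE A (Python) =====
-- def _compute_abort_set(
--     failed_task: str,
--     deps: dict[str, list[str]],
--     active_tasks: set[str],
-- ) -> set[str]:
--     """Compute which active tasks should be aborted after a failure.
--
--     Returns the set of active task names that transitively depend on
--     *failed_task*.  Tasks with no dependency path to the failed task
--     are not included -- they continue executing.
--
--     Args:
--         failed_task: Name of the task that failed.
--         deps: Dependency map from ``extract_dag_data`` (task -> list of
--               tasks it depends on).
--         active_tasks: Set of currently running task names.
--     """
--     # Build reverse dependency map: task -> set of tasks that depend on it.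
--     dependents: dict[str, set[str]] = {}
--     for task, task_deps in deps.items():
--         for dep in task_deps:
--             dependents.setdefault(dep, set()).add(task)
--
--     # BFS from failed_task through dependents.
--     to_abort: set[str] = set()
--     queue = list(dependents.get(failed_task, set()))
--     while queue:
--         task = queue.pop()
--         if task in to_abort:
--             continue
--         to_abort.add(task)
--         for downstream in dependents.get(task, set()):
--             if downstream not in to_abort:
--                 queue.append(downstream)
--
--     # Only abort tasks that are actually still active.
--     return to_abort & active_tasks
-- ===== SOURCE B (Python) =====
-- def _compute_abort_set(failed_task, deps, active_tasks):
--     """Forward fixpoint: grow the set of tasks known to depend (transitively)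
--     on failed_task by repeated passes over deps until nothing changes."""
--     reach = set()
--     while True:
--         new = {t for t, ds in deps.items()
--                if t not in reach and any(d == failed_task or d in reach for d in ds)}
--         if not new:
--             break
--         reach |= new
--     return {t for t in active_tasks if t in reach}
-- ===== Notes on version B (the rewrite author's own statement) =====
-- stated objective: alternative
-- what changed: A builds a reverse dependency map and runs a stack-based traversal from the failed task; B keeps no reverse map and instead computes the set of tasks that transitively depend on the failed task by forward fixpoint iteration (repeated passes over deps adding any task with a dependency on failed_task or on an already-marked task), then filters the active tasks.
import Mathlib
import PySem

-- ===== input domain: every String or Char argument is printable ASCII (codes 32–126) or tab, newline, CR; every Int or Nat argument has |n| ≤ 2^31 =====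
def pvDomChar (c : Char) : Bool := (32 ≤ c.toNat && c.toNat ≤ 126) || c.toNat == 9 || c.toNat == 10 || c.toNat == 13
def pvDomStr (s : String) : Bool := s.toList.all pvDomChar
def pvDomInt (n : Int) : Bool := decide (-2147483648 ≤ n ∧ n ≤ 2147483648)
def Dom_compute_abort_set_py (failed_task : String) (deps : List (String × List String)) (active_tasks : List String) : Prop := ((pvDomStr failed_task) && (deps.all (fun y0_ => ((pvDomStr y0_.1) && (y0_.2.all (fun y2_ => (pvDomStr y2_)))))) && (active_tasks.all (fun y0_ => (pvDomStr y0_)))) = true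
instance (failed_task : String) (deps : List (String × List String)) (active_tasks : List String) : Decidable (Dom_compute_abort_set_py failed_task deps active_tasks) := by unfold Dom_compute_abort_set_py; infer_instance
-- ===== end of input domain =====

-- B replaces A's reverse-dependency map + stack traversal by a forward fixpoint iteration
-- over deps (objective: alternative algorithm, same return value as a set; Python's set
-- iteration/“&” order is unspecified and not modelled, both ports fix the result order to
-- active_tasks (first-insertion) order).


-- ===== PORT A =====
-- dependents: dict task -> set of tasks that depend on it; setdefault(dep, set()).add(task)
-- is dict.modify dep ∅ (·.add task).
def pvBuildDependents (deps : List (String × List String)) : PySem.Dict String (PySem.Set String) :=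
  deps.foldl
    (fun d p => p.2.foldl
      (fun d dep => d.modify dep PySem.Set.empty (fun s => PySem.Set.add s p.1)) d)
    PySem.Dict.empty

-- weight of the not-yet-visited part of the reverse map (termination measure only)
def pvRemWeight (dm : PySem.Dict String (PySem.Set String)) (v : PySem.Set String) : Nat :=
  ((dm.items.filter (fun p => !(PySem.Set.contains v p.1))).map (fun p => p.2.length)).sum

theorem pvContains_false_iff (s : PySem.Set String) (x : String) :
    PySem.Set.contains s x = false ↔ x ∉ s :=
  Bool.eq_false_iff.trans (not_congr (PySem.Set.contains_iff s x))

theorem pvW_add_le (l : List (String × PySem.Set String)) (v : PySem.Set String) (t : String) :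
    ((l.filter (fun p => !(PySem.Set.contains (PySem.Set.add v t) p.1))).map
        (fun p => p.2.length)).sum ≤
      ((l.filter (fun p => !(PySem.Set.contains v p.1))).map (fun p => p.2.length)).sum := by
  refine List.Sublist.sum_le_sum (List.Sublist.map _ (List.monotone_filter_right l ?_))
    (fun a _ => Nat.zero_le _)
  intro p hp
  simp only [Bool.not_eq_true'] at hp ⊢
  rw [pvContains_false_iff] at hp ⊢
  exact fun hm => hp ((PySem.Set.mem_add v t p.1).mpr (Or.inl hm))

theorem pvSum_filter_ne_lt (t : String) (s : PySem.Set String) :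
    ∀ P : List (String × PySem.Set String), (t, s) ∈ P → s ≠ [] →
      ((P.filter (fun p => !(p.1 == t))).map (fun p => p.2.length)).sum <
        (P.map (fun p => p.2.length)).sum := by
  intro P
  induction P with
  | nil => intro h; cases h
  | cons a rest ih =>
    intro hmem hs
    rcases List.mem_cons.mp hmem with heq | hrest
    · have hsub : ((rest.filter (fun p => !(p.1 == t))).map (fun p => p.2.length)).sum ≤
          (rest.map (fun p => p.2.length)).sum :=
        List.Sublist.sum_le_sum (List.Sublist.map _ List.filter_sublist)
          (fun a _ => Nat.zero_le _)
      have hlen : 0 < s.length := List.length_pos_iff.mpr hs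
      rw [← heq]
      simp
      omega
    · by_cases ht : (a.1 == t) = true
      · have := ih hrest hs
        simp [ht]
        omega
      · have := ih hrest hs
        have ht' : (a.1 == t) = false := by simpa using ht
        simp [ht']
        omega

theorem pvW_add_lt (l : List (String × PySem.Set String)) (v : PySem.Set String)
    (t : String) (s : PySem.Set String) (hmem : (t, s) ∈ l)
    (hv : t ∉ v) (hs : s ≠ []) :
    ((l.filter (fun p => !(PySem.Set.contains (PySem.Set.add v t) p.1))).map
        (fun p => p.2.length)).sum <
      ((l.filter (fun p => !(PySem.Set.contains v p.1))).map (fun p => p.2.length)).sum := by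
  have hpred : (fun p : String × PySem.Set String =>
      !(PySem.Set.contains (PySem.Set.add v t) p.1)) =
      (fun p : String × PySem.Set String =>
        (!(p.1 == t)) && !(PySem.Set.contains v p.1)) := by
    funext p
    by_cases hm : p.1 ∈ v <;> by_cases hteq : p.1 = t <;>
      simp [hm, hteq, PySem.Set.mem_add]
  rw [hpred, ← List.filter_filter]
  exact pvSum_filter_ne_lt t s _
    (List.mem_filter.mpr ⟨hmem, by simpa [pvContains_false_iff] using hv⟩) hs

-- the `while queue:` loop of A: pop from the end, skip visited, push unvisited downstream
def pvLoopA (dm : PySem.Dict String (PySem.Set String)) (v : PySem.Set String)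
    (q : List String) : PySem.Set String :=
  if h : q = [] then v
  else
    let task := q.getLast h
    let q' := q.dropLast
    if PySem.Set.contains v task then pvLoopA dm v q'
    else
      let v' := PySem.Set.add v task
      pvLoopA dm v'
        (q' ++ (dm.getD task PySem.Set.empty).filter (fun x => !(PySem.Set.contains v' x)))
  termination_by (pvRemWeight dm v, q.length)
  decreasing_by
  · exact Prod.Lex.right _ (by
      have hq : q.length ≠ 0 := by simpa using h
      simp [List.length_dropLast]; omega)
  · rename_i hnotmem
    set task := q.getLast h
    rcases hpush : (dm.getD task PySem.Set.empty).filter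
        (fun x => !(PySem.Set.contains (PySem.Set.add v task) x)) with _ | ⟨z, zs⟩
    · rcases eq_or_lt_of_le (pvW_add_le dm.items v task) with heq | hlt
      · have hw : pvRemWeight dm (v.add task) = pvRemWeight dm v := heq
        rw [hw]
        refine Prod.Lex.right _ ?_
        have hq : q.length ≠ 0 := by simpa using h
        simp [List.length_dropLast]; omega
      · exact Prod.Lex.left _ _ hlt
    · apply Prod.Lex.left
      have hne : dm.getD task PySem.Set.empty ≠ [] := by
        intro h0; rw [h0] at hpush; simp at hpush
      have hget : dm.get? task ≠ none := by
        intro h0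
        exact hne (by rw [PySem.Dict.getD_eq_get?_getD, h0]; rfl)
      rcases hg : dm.get? task with _ | s
      · exact absurd hg hget
      · have hmem : (task, s) ∈ dm.items := PySem.Dict.mem_items_of_get?_eq_some dm hg
        have hgd : dm.getD task PySem.Set.empty = s := by
          rw [PySem.Dict.getD_eq_get?_getD, hg]; rfl
        have hsne : s ≠ [] := by rw [← hgd]; exact hne
        have hv : task ∉ v := fun hmem' =>
          hnotmem ((PySem.Set.contains_iff v task).mpr hmem')
        exact pvW_add_lt dm.items v task s hmem hv hsne

def compute_abort_set_py (failed_task : String) (deps : List (String × List String)) (active_tasks : List String) : List String :=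
  let dependents := pvBuildDependents deps
  let to_abort := pvLoopA dependents PySem.Set.empty (dependents.getD failed_task PySem.Set.empty)
  -- `to_abort & active_tasks`: the result is a set, whose order Python leaves unspecified
  -- (hash order, not modelled by PySem); this port fixes it to active_tasks order
  -- (ofList normalizes the list representing the set argument).
  PySem.Set.inter (PySem.Set.ofList active_tasks) to_abort

-- ===== PORT B =====
-- one pass of B's `while True:` body: the set comprehension over deps.items()
def pvNewSet (failed : String) (deps : List (String × List String))
    (reach : PySem.Set String) : PySem.Set String :=
  deps.foldl
    (fun nw p =>
      if !(PySem.Set.contains reach p.1)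
          && p.2.any (fun d => d == failed || PySem.Set.contains reach d)
      then PySem.Set.add nw p.1 else nw)
    PySem.Set.empty

theorem mem_foldl_addIf {β : Type} (c : (String × β) → Bool) :
    ∀ (l : List (String × β)) (s0 : PySem.Set String) (y : String),
      y ∈ l.foldl (fun s p => if c p then PySem.Set.add s p.1 else s) s0 ↔
        y ∈ s0 ∨ ∃ p ∈ l, c p = true ∧ y = p.1 := by
  intro l
  induction l with
  | nil => simp
  | cons a rest ih =>
    intro s0 y
    simp only [List.foldl_cons]
    by_cases hc : c a = true
    · rw [hc, if_pos rfl, ih]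
      constructor
      · rintro (hs | hp)
        · rcases (PySem.Set.mem_add s0 a.1 y).mp hs with hs | hs
          · exact Or.inl hs
          · exact Or.inr ⟨a, List.mem_cons_self, hc, hs⟩
        · rcases hp with ⟨p, hp, hcp, hy⟩
          exact Or.inr ⟨p, List.mem_cons_of_mem _ hp, hcp, hy⟩
      · rintro (hs | ⟨p, hp, hcp, hy⟩)
        · exact Or.inl ((PySem.Set.mem_add s0 a.1 y).mpr (Or.inl hs))
        · rcases List.mem_cons.mp hp with heq | hp
          · exact Or.inl ((PySem.Set.mem_add s0 a.1 y).mpr (Or.inr (heq ▸ hy)))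
          · exact Or.inr ⟨p, hp, hcp, hy⟩
    · rw [if_neg hc, ih]
      constructor
      · rintro (hs | ⟨p, hp, hcp, hy⟩)
        · exact Or.inl hs
        · exact Or.inr ⟨p, List.mem_cons_of_mem _ hp, hcp, hy⟩
      · rintro (hs | ⟨p, hp, hcp, hy⟩)
        · exact Or.inl hs
        · rcases List.mem_cons.mp hp with heq | hp
          · exact absurd (heq ▸ hcp) hc
          · exact Or.inr ⟨p, hp, hcp, hy⟩

theorem mem_pvNewSet (failed : String) (deps : List (String × List String))
    (reach : PySem.Set String) (x : String) :
    x ∈ pvNewSet failed deps reach ↔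
      ∃ p ∈ deps,
        ((!(PySem.Set.contains reach p.1))
            && p.2.any (fun d => d == failed || PySem.Set.contains reach d)) = true
          ∧ x = p.1 := by
  unfold pvNewSet
  rw [mem_foldl_addIf]
  simp [PySem.Set.empty]

theorem pvFilter_length_lt {α : Type} (l : List α) (q : α → Bool) (x : α)
    (hx : x ∈ l) (hqx : q x = false) : (l.filter q).length < l.length := by
  induction l with
  | nil => cases hx
  | cons a rest ih =>
    rcases List.mem_cons.mp hx with heq | hx
    · have hqa : q a = false := heq ▸ hqx
      have := List.length_filter_le q rest
      rw [List.filter_cons, if_neg (by simp [hqa])]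
      simp only [List.length_cons]; omega
    · have := ih hx
      rw [List.filter_cons]
      by_cases hq : q a = true
      · rw [if_pos hq]; simp only [List.length_cons]; omega
      · rw [if_neg hq]; simp only [List.length_cons]; omega

theorem length_filter_lt_of_imp {α : Type} (l : List α) (p q : α → Bool)
    (himp : ∀ x, q x = true → p x = true)
    (x : α) (hx : x ∈ l) (hpx : p x = true) (hqx : q x = false) :
    (l.filter q).length < (l.filter p).length := by
  have h1 : (l.filter p).filter q = l.filter q := by
    rw [List.filter_filter]
    apply List.filter_congr
    intro a _
    cases hqa : q a
    · simp
    · simp [himp a hqa]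
  calc (l.filter q).length = ((l.filter p).filter q).length := by rw [h1]
    _ < (l.filter p).length :=
        pvFilter_length_lt _ _ x (List.mem_filter.mpr ⟨hx, hpx⟩) hqx

-- `while True: new = …; if not new: break; reach |= new`
def pvLoopB (failed : String) (deps : List (String × List String))
    (reach : PySem.Set String) : PySem.Set String :=
  let nw := pvNewSet failed deps reach
  if nw = [] then reach else pvLoopB failed deps (PySem.Set.union reach nw)
  termination_by ((PySem.Set.ofList (deps.map Prod.fst)).filter
      (fun k => !(PySem.Set.contains reach k))).length
  decreasing_by
    rename_i hne
    obtain ⟨x, hxmem⟩ := List.exists_mem_of_ne_nil _ hne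
    rcases (mem_pvNewSet failed deps reach x).mp hxmem with ⟨p, hp, hcp, rfl⟩
    have hxreach : PySem.Set.contains reach p.1 = false := by
      rcases Bool.and_eq_true_iff.mp hcp with ⟨h1, _⟩
      simpa using h1
    refine length_filter_lt_of_imp _ _ _ ?_ p.1 ?_ ?_ ?_
    · intro y hy
      simp only [Bool.not_eq_true'] at hy ⊢
      rw [pvContains_false_iff] at hy ⊢
      exact fun hm => hy ((PySem.Set.mem_union _ _ _).mpr (Or.inl hm))
    · exact (PySem.Set.mem_ofList _ _).mpr (List.mem_map.mpr ⟨p, hp, rfl⟩)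
    · simpa using hxreach
    · simp
      exact fun _ => hxmem

def compute_abort_set_py_alt (failed_task : String) (deps : List (String × List String)) (active_tasks : List String) : List String :=
  let reach := pvLoopB failed_task deps PySem.Set.empty
  -- `{t for t in active_tasks if t in reach}` (a set built in active_tasks order)
  active_tasks.foldl
    (fun out t => if PySem.Set.contains reach t then PySem.Set.add out t else out)
    PySem.Set.empty

-- ===== PRECONDITION & SPEC =====
def Spec_compute_abort_set_py (failed_task : String) (deps : List (String × List String)) (active_tasks : List String) (out : List String) : Prop := out = compute_abort_set_py_alt failed_task deps active_tasks
instance (failed_task : String) (deps : List (String × List String)) (active_tasks : List String) (out : List String) : Decidable (Spec_compute_abort_set_py failed_task deps active_tasks out) := by unfold Spec_compute_abort_set_py; infer_instance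

-- ===== CLAIM (what is proved, stated in full; the proofs are below) =====
def Claim_equal_compute_abort_set_py : Prop := ∀ (failed_task : String) (deps : List (String × List String)) (active_tasks : List String), Dom_compute_abort_set_py failed_task deps active_tasks → Spec_compute_abort_set_py failed_task deps active_tasks (compute_abort_set_py failed_task deps active_tasks)

-- ===== LEMMAS AND PROOFS =====

-- forward dependency edge of `deps`: x depends directly on y
def pvFEdge (deps : List (String × List String)) (x y : String) : Prop :=
  ∃ ds, (x, ds) ∈ deps ∧ y ∈ ds

-- reverse edge as stored in the dependents map
def pvREdge (dm : PySem.Dict String (PySem.Set String)) (a b : String) : Prop :=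
  b ∈ dm.getD a PySem.Set.empty

theorem pvInner_getD (task : String) :
    ∀ (ds : List String) (d0 : PySem.Dict String (PySem.Set String)) (key t : String),
      t ∈ (ds.foldl (fun d dep => d.modify dep PySem.Set.empty
            (fun s => PySem.Set.add s task)) d0).getD key PySem.Set.empty ↔
        t ∈ d0.getD key PySem.Set.empty ∨ (key ∈ ds ∧ t = task) := by
  intro ds
  induction ds with
  | nil => intro d0 key t; simp
  | cons dep rest ih =>
    intro d0 key t
    rw [List.foldl_cons, ih]
    rw [PySem.Dict.getD_modify]
    by_cases hk : key = dep
    · subst hk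
      rw [if_pos rfl, PySem.Set.mem_add]
      constructor
      · rintro ((h | h) | h)
        · exact Or.inl h
        · exact Or.inr ⟨List.mem_cons_self, h⟩
        · exact Or.inr ⟨List.mem_cons_of_mem _ h.1, h.2⟩
      · rintro (h | ⟨hmem, ht⟩)
        · exact Or.inl (Or.inl h)
        · exact Or.inl (Or.inr ht)
    · rw [if_neg hk]
      constructor
      · rintro (h | h)
        · exact Or.inl h
        · exact Or.inr ⟨List.mem_cons_of_mem _ h.1, h.2⟩
      · rintro (h | ⟨hmem, ht⟩)
        · exact Or.inl h
        · rcases List.mem_cons.mp hmem with heq | hmem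
          · exact absurd heq hk
          · exact Or.inr ⟨hmem, ht⟩

theorem pvOuter_getD :
    ∀ (l : List (String × List String)) (d0 : PySem.Dict String (PySem.Set String))
      (key t : String),
      t ∈ (l.foldl (fun d p => p.2.foldl (fun d dep => d.modify dep PySem.Set.empty
            (fun s => PySem.Set.add s p.1)) d) d0).getD key PySem.Set.empty ↔
        t ∈ d0.getD key PySem.Set.empty ∨ ∃ p ∈ l, p.1 = t ∧ key ∈ p.2 := by
  intro l
  induction l with
  | nil => intro d0 key t; simp
  | cons a rest ih =>
    intro d0 key t
    rw [List.foldl_cons, ih, pvInner_getD]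
    constructor
    · rintro ((h | ⟨hk, ht⟩) | ⟨p, hp, h1, h2⟩)
      · exact Or.inl h
      · exact Or.inr ⟨a, List.mem_cons_self, ht.symm, hk⟩
      · exact Or.inr ⟨p, List.mem_cons_of_mem _ hp, h1, h2⟩
    · rintro (h | ⟨p, hp, h1, h2⟩)
      · exact Or.inl (Or.inl h)
      · rcases List.mem_cons.mp hp with heq | hp
        · exact Or.inl (Or.inr ⟨heq ▸ h2, (heq ▸ h1).symm⟩)
        · exact Or.inr ⟨p, hp, h1, h2⟩

theorem mem_getD_pvBuildDependents (deps : List (String × List String)) (d t : String) :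
    t ∈ (pvBuildDependents deps).getD d PySem.Set.empty ↔ pvFEdge deps t d := by
  unfold pvBuildDependents
  rw [pvOuter_getD]
  simp only [PySem.Dict.getD_empty]
  constructor
  · rintro (h | ⟨p, hp, h1, h2⟩)
    · simp [PySem.Set.empty] at h
    · exact ⟨p.2, by rw [← h1]; exact hp, h2⟩
  · rintro ⟨ds, hmem, hd⟩
    exact Or.inr ⟨(t, ds), hmem, rfl, hd⟩

theorem pvReach_from_visited (dm : PySem.Dict String (PySem.Set String))
    (v : PySem.Set String) (q : List String)
    (hInv : ∀ t ∈ v, ∀ z ∈ dm.getD t PySem.Set.empty, z ∈ v ∨ z ∈ q)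
    (t x : String) (ht : t ∈ v) (hr : Relation.ReflTransGen (pvREdge dm) t x) :
    x ∈ v ∨ ∃ y ∈ q, Relation.ReflTransGen (pvREdge dm) y x := by
  induction hr using Relation.ReflTransGen.head_induction_on with
  | refl => exact Or.inl ht
  | head h' htail ihtail =>
    rename_i a c
    rcases hInv a ht c h' with hc | hc
    · exact ihtail hc
    · exact Or.inr ⟨c, hc, htail⟩

theorem mem_pvLoopA (dm : PySem.Dict String (PySem.Set String)) :
    ∀ (v : PySem.Set String) (q : List String),
      (∀ t ∈ v, ∀ z ∈ dm.getD t PySem.Set.empty, z ∈ v ∨ z ∈ q) → ∀ x : String,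
      (x ∈ pvLoopA dm v q ↔ x ∈ v ∨ ∃ y ∈ q, Relation.ReflTransGen (pvREdge dm) y x) := by
  intro v q
  fun_induction pvLoopA dm v q with
  | case1 h => intro _ x; simp
  | case2 v q h task q' hmem ih =>
    intro hInv x
    have hsplit : q.dropLast ++ [q.getLast h] = q := List.dropLast_append_getLast h
    have hInv' : ∀ t ∈ v, ∀ z ∈ dm.getD t PySem.Set.empty, z ∈ v ∨ z ∈ q' := by
      intro t ht z hz
      rcases hInv t ht z hz with hzv | hzq
      · exact Or.inl hzv
      · rcases List.mem_append.mp (hsplit ▸ hzq) with hz' | hz'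
        · exact Or.inr hz'
        · have hzt : z = q.getLast h := by simpa using hz'
          refine Or.inl ?_
          rw [hzt]
          exact (PySem.Set.contains_iff v task).mp hmem
    rw [ih hInv' x]
    have htaskv : task ∈ v := (PySem.Set.contains_iff v task).mp hmem
    constructor
    · rintro (hx | ⟨y, hy, hr⟩)
      · exact Or.inl hx
      · have hyq : y ∈ q := hsplit ▸ List.mem_append.mpr (Or.inl hy)
        exact Or.inr ⟨y, hyq, hr⟩
    · rintro (hx | ⟨y, hy, hr⟩)
      · exact Or.inl hx
      · rcases List.mem_append.mp (hsplit ▸ hy) with hy' | hy'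
        · exact Or.inr ⟨y, hy', hr⟩
        · have hyt : y = q.getLast h := by simpa using hy'
          have hr2 : Relation.ReflTransGen (pvREdge dm) (q.getLast h) x := hyt ▸ hr
          exact pvReach_from_visited dm v q' hInv' task x htaskv hr2
  | case3 v q h task q' hmem v' ih =>
    intro hInv x
    have hsplit : q.dropLast ++ [q.getLast h] = q := List.dropLast_append_getLast h
    have htaskq : task ∈ q := hsplit ▸ List.mem_append.mpr (Or.inr (List.mem_singleton.mpr rfl))
    have hInv' : ∀ t ∈ v', ∀ z ∈ dm.getD t PySem.Set.empty,
        z ∈ v' ∨ z ∈ q' ++ (dm.getD task PySem.Set.empty).filter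
          (fun x => !(PySem.Set.contains v' x)) := by
      intro t ht z hz
      rcases (PySem.Set.mem_add v task t).mp ht with htv | htt
      · rcases hInv t htv z hz with hzv | hzq
        · exact Or.inl ((PySem.Set.mem_add v task z).mpr (Or.inl hzv))
        · rcases List.mem_append.mp (hsplit ▸ hzq) with hz' | hz'
          · exact Or.inr (List.mem_append.mpr (Or.inl hz'))
          · have hzt : z = q.getLast h := by simpa using hz'
            refine Or.inl ?_
            rw [hzt]
            exact (PySem.Set.mem_add v task task).mpr (Or.inr rfl)
      · have hz' : z ∈ dm.getD task PySem.Set.empty := htt ▸ hz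
        by_cases hzv' : z ∈ v'
        · exact Or.inl hzv'
        · refine Or.inr (List.mem_append.mpr (Or.inr (List.mem_filter.mpr ⟨hz', ?_⟩)))
          simp only [Bool.not_eq_true']
          exact (pvContains_false_iff v' z).mpr hzv'
    rw [ih hInv' x]
    constructor
    · rintro (hx | ⟨y, hy, hr⟩)
      · rcases (PySem.Set.mem_add v task x).mp hx with hxv | hxt
        · exact Or.inl hxv
        · exact Or.inr ⟨task, htaskq, hxt ▸ Relation.ReflTransGen.refl⟩
      · rcases List.mem_append.mp hy with hy' | hy'
        · have hyq : y ∈ q := hsplit ▸ List.mem_append.mpr (Or.inl hy')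
          exact Or.inr ⟨y, hyq, hr⟩
        · have hedge : pvREdge dm task y := (List.mem_filter.mp hy').1
          exact Or.inr ⟨task, htaskq, Relation.ReflTransGen.head hedge hr⟩
    · rintro (hx | ⟨y, hy, hr⟩)
      · exact Or.inl ((PySem.Set.mem_add v task x).mpr (Or.inl hx))
      · rcases List.mem_append.mp (hsplit ▸ hy) with hy' | hy'
        · exact Or.inr ⟨y, List.mem_append.mpr (Or.inl hy'), hr⟩
        · have hyt : y = q.getLast h := by simpa using hy'
          have hr' : Relation.ReflTransGen (pvREdge dm) (q.getLast h) x := hyt ▸ hr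
          rcases Relation.ReflTransGen.cases_head hr' with heq | ⟨c, hc, hcr⟩
          · refine Or.inl ?_
            rw [← heq]
            exact (PySem.Set.mem_add v task task).mpr (Or.inr rfl)
          · by_cases hcv : c ∈ v'
            · exact pvReach_from_visited dm v' _ hInv' c x hcv hcr
            · have hcf : c ∈ (dm.getD task PySem.Set.empty).filter
                  (fun x => !(PySem.Set.contains v' x)) := by
                refine List.mem_filter.mpr ⟨hc, ?_⟩
                simp only [Bool.not_eq_true']
                exact (pvContains_false_iff v' c).mpr hcv
              exact Or.inr ⟨c, List.mem_append.mpr (Or.inr hcf), hcr⟩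

theorem pvNewSet_sound (failed : String) (deps : List (String × List String))
    (reach : PySem.Set String)
    (hInv : ∀ t ∈ reach, Relation.TransGen (pvFEdge deps) t failed) :
    ∀ x ∈ pvNewSet failed deps reach, Relation.TransGen (pvFEdge deps) x failed := by
  intro x hx
  rcases (mem_pvNewSet failed deps reach x).mp hx with ⟨p, hp, hcp, rfl⟩
  rcases Bool.and_eq_true_iff.mp hcp with ⟨_, hany⟩
  rcases List.any_eq_true.mp hany with ⟨d, hd, hdc⟩
  have hpmem : (p.1, p.2) ∈ deps := by simpa using hp
  rcases Bool.or_eq_true_iff.mp hdc with hdf | hdr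
  · have : d = failed := by simpa using hdf
    exact Relation.TransGen.single ⟨p.2, hpmem, this ▸ hd⟩
  · exact Relation.TransGen.head ⟨p.2, hpmem, hd⟩
      (hInv d ((PySem.Set.contains_iff reach d).mp hdr))

theorem pvFixpoint_complete (failed : String) (deps : List (String × List String))
    (reach : PySem.Set String) (hnw : pvNewSet failed deps reach = []) :
    ∀ x, Relation.TransGen (pvFEdge deps) x failed → x ∈ reach := by
  intro x hx
  induction hx using Relation.TransGen.head_induction_on with
  | single hedge =>
    rename_i a
    rcases hedge with ⟨ds, hmem, hf⟩
    by_contra ha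
    have hin : a ∈ pvNewSet failed deps reach := by
      rw [mem_pvNewSet]
      refine ⟨(a, ds), hmem, ?_, rfl⟩
      simp only [Bool.and_eq_true]
      constructor
      · simp only [Bool.not_eq_true']
        exact (pvContains_false_iff reach a).mpr ha
      · exact List.any_eq_true.mpr ⟨failed, hf, by simp⟩
    rw [hnw] at hin
    cases hin
  | head hedge htg ihc =>
    rename_i a c
    rcases hedge with ⟨ds, hmem, hc⟩
    by_contra ha
    have hin : a ∈ pvNewSet failed deps reach := by
      rw [mem_pvNewSet]
      refine ⟨(a, ds), hmem, ?_, rfl⟩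
      simp only [Bool.and_eq_true]
      constructor
      · simp only [Bool.not_eq_true']
        exact (pvContains_false_iff reach a).mpr ha
      · refine List.any_eq_true.mpr ⟨c, hc, ?_⟩
        simp
        exact Or.inr ihc
    rw [hnw] at hin
    cases hin

theorem mem_pvLoopB (failed : String) (deps : List (String × List String)) :
    ∀ reach : PySem.Set String,
      (∀ t ∈ reach, Relation.TransGen (pvFEdge deps) t failed) → ∀ x : String,
      (x ∈ pvLoopB failed deps reach ↔
        x ∈ reach ∨ Relation.TransGen (pvFEdge deps) x failed) := by
  intro reach
  fun_induction pvLoopB failed deps reach with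
  | case1 reach nw hnil =>
    intro hInv x
    constructor
    · exact Or.inl
    · rintro (hx | hx)
      · exact hx
      · exact pvFixpoint_complete failed deps reach hnil x hx
  | case2 reach nw hne ih =>
    intro hInv x
    have hInv' : ∀ t ∈ PySem.Set.union reach nw,
        Relation.TransGen (pvFEdge deps) t failed := by
      intro t ht
      rcases (PySem.Set.mem_union reach nw t).mp ht with ht | ht
      · exact hInv t ht
      · exact pvNewSet_sound failed deps reach hInv t ht
    rw [ih hInv' x]
    constructor
    · rintro (hx | hx)
      · rcases (PySem.Set.mem_union reach nw x).mp hx with hx | hx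
        · exact Or.inl hx
        · exact Or.inr (pvNewSet_sound failed deps reach hInv x hx)
      · exact Or.inr hx
    · rintro (hx | hx)
      · exact Or.inl ((PySem.Set.mem_union reach nw x).mpr (Or.inl hx))
      · exact Or.inr hx

theorem pvOfList_filter (l : List String) (p : String → Bool) :
    PySem.Set.ofList (l.filter p) = (PySem.Set.ofList l).filter p := by
  induction l using List.reverseRecOn with
  | nil => simp
  | append_singleton l x ih =>
    rw [List.filter_append, PySem.Set.ofList_append_singleton]
    by_cases hm : x ∈ l
    · have hmo : x ∈ PySem.Set.ofList l := (PySem.Set.mem_ofList l x).mpr hm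
      rw [PySem.Set.add_of_mem hmo]
      cases hp : p x
      · have h0 : List.filter p [x] = [] := by simp [hp]
        rw [h0, List.append_nil, ih]
      · have h0 : List.filter p [x] = [x] := by simp [hp]
        rw [h0, PySem.Set.ofList_append_singleton, ih]
        have hmf : x ∈ (PySem.Set.ofList l).filter p := List.mem_filter.mpr ⟨hmo, hp⟩
        rw [PySem.Set.add_of_mem hmf]
    · have hmo : x ∉ PySem.Set.ofList l := fun hx => hm ((PySem.Set.mem_ofList l x).mp hx)
      rw [PySem.Set.add_of_not_mem hmo, List.filter_append]
      cases hp : p x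
      · have h0 : List.filter p [x] = [] := by simp [hp]
        rw [h0, List.append_nil, List.append_nil, ih]
      · have h0 : List.filter p [x] = [x] := by simp [hp]
        rw [h0, PySem.Set.ofList_append_singleton, ih]
        have hxf : x ∉ (PySem.Set.ofList l).filter p := fun hx =>
          hmo (List.mem_filter.mp hx).1
        rw [PySem.Set.add_of_not_mem hxf]

-- ===== VERDICT (by name: the statement is the Claim_ definition above) =====
theorem compute_abort_set_py_spec : Claim_equal_compute_abort_set_py := by
  unfold Claim_equal_compute_abort_set_py
  intro failed deps active _
  unfold Spec_compute_abort_set_py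
  unfold compute_abort_set_py compute_abort_set_py_alt
  set dm := pvBuildDependents deps with hdm
  set to_abort := pvLoopA dm PySem.Set.empty (dm.getD failed PySem.Set.empty) with hta
  set reach := pvLoopB failed deps PySem.Set.empty with hre
  have hA : ∀ x, x ∈ to_abort ↔ Relation.TransGen (pvFEdge deps) x failed := by
    intro x
    rw [hta, mem_pvLoopA dm PySem.Set.empty (dm.getD failed PySem.Set.empty)
      (by intro t ht; simp [PySem.Set.empty] at ht) x]
    simp only [PySem.Set.empty]
    constructor
    · rintro (h | ⟨y, hy, hr⟩)
      · simp at h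
      · have hT : Relation.TransGen (pvREdge dm) failed x :=
          Relation.TransGen.head'_iff.mpr ⟨y, hy, hr⟩
        have hswap : Relation.TransGen (fun a b => pvFEdge deps b a) failed x :=
          Relation.TransGen.mono
            (fun a b hab => (mem_getD_pvBuildDependents deps a b).mp hab) hT
        exact Relation.transGen_swap.mp hswap
    · intro h
      have hswap : Relation.TransGen (fun a b => pvFEdge deps b a) failed x :=
        Relation.transGen_swap.mpr h
      have hT : Relation.TransGen (pvREdge dm) failed x :=
        Relation.TransGen.mono
          (fun a b hab => (mem_getD_pvBuildDependents deps a b).mpr hab) hswap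
      rcases Relation.TransGen.head'_iff.mp hT with ⟨y, hy, hr⟩
      exact Or.inr ⟨y, hy, hr⟩
  have hB : ∀ x, x ∈ reach ↔ Relation.TransGen (pvFEdge deps) x failed := by
    intro x
    rw [hre, mem_pvLoopB failed deps PySem.Set.empty
      (by intro t ht; simp [PySem.Set.empty] at ht) x]
    simp [PySem.Set.empty]
  have hcont : ∀ x, PySem.Set.contains reach x = PySem.Set.contains to_abort x := by
    intro x
    cases hc : PySem.Set.contains to_abort x
    · refine (pvContains_false_iff _ _).mpr (fun hm => ?_)
      exact absurd ((hA x).mpr ((hB x).mp hm)) ((pvContains_false_iff _ _).mp hc)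
    · exact (PySem.Set.contains_iff _ _).mpr
        ((hB x).mpr ((hA x).mp ((PySem.Set.contains_iff _ _).mp hc)))
  have hfold : active.foldl
      (fun out t => if PySem.Set.contains reach t then PySem.Set.add out t else out)
      PySem.Set.empty =
      PySem.Set.ofList (active.filter (fun t => PySem.Set.contains reach t)) := by
    rw [PySem.Set.ofList_eq_foldl, List.foldl_filter]
    rfl
  rw [hfold]
  have hfc : active.filter (fun t => PySem.Set.contains reach t) =
      active.filter (fun t => PySem.Set.contains to_abort t) :=
    List.filter_congr (fun x _ => hcont x)
  rw [hfc, pvOfList_filter]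
  rfl
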